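-- pv_equiv track=rewrite | github.com/hydromatic/morel-rust | etc/enable_queries.py | _update_comment_depth
-- ===== SOURCE A (Python) =====
-- def _update_comment_depth(depth: int, line: str) -> int:
--     """Update comment nesting depth after processing `line`."""
--     i = 0
--     while i < len(line):
--         if line[i] == '(' and i + 1 < len(line) and line[i + 1] == '*':
--             if i + 2 < len(line) and line[i + 2] == ')':
--                 # (*) line comment: skip to end
--                 return depth  # doesn't change depth (inline, self-closing)
--             else:
--                 depth += 1
--                 i += 2
--         elif line[i] == '*' and i + 1 < len(line) and line[i + 1] == ')':
--             depth = max(0, depth - 1)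
--             i += 2
--         else:
--             i += 1
--     return depth
-- ===== SOURCE B (Python) =====
-- def _tokenize(line: str):
--     """Leftmost non-overlapping comment tokens: '(*)', '(*', '*)' (in that priority)."""
--     tokens = []
--     i = 0
--     n = len(line)
--     while i < n:
--         if line.startswith('(*)', i):
--             tokens.append('(*)')
--             i += 3
--         elif line.startswith('(*', i):
--             tokens.append('(*')
--             i += 2
--         elif line.startswith('*)', i):
--             tokens.append('*)')
--             i += 2
--         else:
--             i += 1
--     return tokens
--
--
-- def _update_comment_depth(depth: int, line: str) -> int:
--     """Update comment nesting depth after processing `line` (tokenize, then fold)."""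
--     for tok in _tokenize(line):
--         if tok == '(*)':
--             return depth
--         elif tok == '(*':
--             depth += 1
--         else:  # '*)'
--             depth = max(0, depth - 1)
--     return depth
-- ===== Notes on version B (the rewrite author's own statement) =====
-- stated objective: alternative
-- what changed: A's single index-based while loop with lookahead is replaced by a two-phase tokenizer design: the line is first tokenized into a list of comment tokens ('(*)', '(*', '*)', leftmost non-overlapping), then the depth is computed by a fold over the token list with an early return on '(*)'.
import Mathlib
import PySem

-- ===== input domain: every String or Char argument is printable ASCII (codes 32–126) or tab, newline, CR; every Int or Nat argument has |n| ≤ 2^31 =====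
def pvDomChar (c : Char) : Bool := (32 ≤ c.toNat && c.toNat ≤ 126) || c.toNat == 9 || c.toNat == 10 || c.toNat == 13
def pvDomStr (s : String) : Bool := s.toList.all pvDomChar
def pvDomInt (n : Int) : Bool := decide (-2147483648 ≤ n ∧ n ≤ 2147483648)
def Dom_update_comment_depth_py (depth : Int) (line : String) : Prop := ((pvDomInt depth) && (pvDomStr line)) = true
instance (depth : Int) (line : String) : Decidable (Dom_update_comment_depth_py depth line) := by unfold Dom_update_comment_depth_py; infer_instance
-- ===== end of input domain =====

-- B replaces A's single index-scanning while loop by a two-phase design (tokenize into a comment-token list, then fold over the tokens); same results, alternative structure.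
-- ===== PORT A =====
-- index-based while loop, transliterated as recursion on the index
def loopA (s : List Char) (depth : Int) (i : Nat) : Int :=
  if h : i < s.length then
    if s[i]! = '(' ∧ i + 1 < s.length ∧ s[i+1]! = '*' then
      if i + 2 < s.length ∧ s[i+2]! = ')' then depth
      else loopA s (depth + 1) (i + 2)
    else if s[i]! = '*' ∧ i + 1 < s.length ∧ s[i+1]! = ')' then
      loopA s (max 0 (depth - 1)) (i + 2)
    else loopA s depth (i + 1)
  else depth
termination_by s.length - i
decreasing_by all_goals omega

def update_comment_depth_py (depth : Int) (line : String) : Int :=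
  loopA line.toList depth 0

-- ===== PORT B =====
-- B: tokenize the line into comment tokens, then fold over the token list
-- (Source B's cursor i is modelled by the remaining suffix `rest` = line[i:]; startswith(t, i) = rest.take |t| = t)
def tokenizeB (rest : List Char) : List String :=
  if _h : rest = [] then []
  else if rest.take 3 = ['(', '*', ')'] then "(*)" :: tokenizeB (rest.drop 3)
  else if rest.take 2 = ['(', '*'] then "(*" :: tokenizeB (rest.drop 2)
  else if rest.take 2 = ['*', ')'] then "*)" :: tokenizeB (rest.drop 2)
  else tokenizeB (rest.drop 1)
termination_by rest.length
decreasing_by all_goals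
  (simp only [List.length_drop]
   have hlen : 0 < rest.length := List.length_pos_of_ne_nil (by assumption)
   omega)

def procB (depth : Int) : List String → Int
  | [] => depth
  | t :: ts =>
    if t = "(*)" then depth
    else if t = "(*" then procB (depth + 1) ts
    else procB (max 0 (depth - 1)) ts

def update_comment_depth_py_alt (depth : Int) (line : String) : Int :=
  procB depth (tokenizeB line.toList)

-- ===== PRECONDITION & SPEC =====
def Spec_update_comment_depth_py (depth : Int) (line : String) (out : Int) : Prop := out = update_comment_depth_py_alt depth line
instance (depth : Int) (line : String) (out : Int) : Decidable (Spec_update_comment_depth_py depth line out) := by unfold Spec_update_comment_depth_py; infer_instance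

-- ===== CLAIM (what is proved, stated in full; the proofs are below) =====
def Claim_equal_update_comment_depth_py : Prop := ∀ (depth : Int) (line : String), Dom_update_comment_depth_py depth line → Spec_update_comment_depth_py depth line (update_comment_depth_py depth line)

-- ===== LEMMAS AND PROOFS =====




lemma tok_nil : tokenizeB [] = [] := by rw [tokenizeB]; simp

lemma tok_close (r : List Char) : tokenizeB ('(' :: '*' :: ')' :: r) = "(*)" :: tokenizeB r := by
  rw [tokenizeB]; simp

lemma tok_open (r : List Char) (h : r.take 1 ≠ [')']) :
    tokenizeB ('(' :: '*' :: r) = "(*" :: tokenizeB r := by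
  rw [tokenizeB]; simp [h]

lemma tok_end (r : List Char) : tokenizeB ('*' :: ')' :: r) = "*)" :: tokenizeB r := by
  rw [tokenizeB]; simp

lemma tok_skip (c : Char) (r : List Char)
    (h1 : ¬ (c = '(' ∧ r.take 1 = ['*'])) (h2 : ¬ (c = '*' ∧ r.take 1 = [')'])) :
    tokenizeB (c :: r) = tokenizeB r := by
  rw [tokenizeB]
  rcases r with _ | ⟨d, r'⟩ <;> simp_all <;> split_ifs <;> simp_all

lemma take_one_drop (s : List Char) (k : Nat) (c : Char) :
    (s.drop k).take 1 = [c] ↔ k < s.length ∧ s[k]! = c := by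
  by_cases h : k < s.length
  · rw [List.drop_eq_getElem_cons h, getElem!_pos s k h]
    simp only [List.take_succ_cons, List.take_zero, List.cons.injEq, and_true, h, true_and]
  · rw [List.drop_eq_nil_of_le (by omega)]
    simp [h]

lemma loopA_eq_proc (n : Nat) : ∀ (s : List Char) (depth : Int) (i : Nat),
    s.length - i = n → loopA s depth i = procB depth (tokenizeB (s.drop i)) := by
  induction n using Nat.strong_induction_on with
  | _ n ih =>
    intro s depth i hn
    rw [loopA]
    by_cases h : i < s.length
    · simp only [dif_pos h]
      have hd : s.drop i = s[i]! :: s.drop (i+1) := by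
        rw [List.drop_eq_getElem_cons h, getElem!_pos s i h]
      split_ifs with h1 h2 h3
      · -- (*) : return depth
        obtain ⟨hc, h1l, hc1⟩ := h1
        obtain ⟨h2l, hc2⟩ := h2
        rw [getElem!_pos s (i+1) h1l] at hc1
        rw [getElem!_pos s (i+2) h2l] at hc2
        rw [hd, List.drop_eq_getElem_cons h1l, List.drop_eq_getElem_cons h2l,
            hc, hc1, hc2, tok_close, procB]
        simp
      · -- (* : depth + 1
        obtain ⟨hc, h1l, hc1⟩ := h1
        rw [getElem!_pos s (i+1) h1l] at hc1
        rw [hd, List.drop_eq_getElem_cons h1l, hc, hc1]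
        rw [tok_open _ (by rw [Ne, take_one_drop]; push Not at h2 ⊢; exact h2)]
        rw [procB]
        simp only [String.reduceEq, if_false, if_true]
        exact ih (s.length - (i+2)) (by omega) s (depth+1) (i+2) rfl
      · -- *) : max 0 (depth - 1)
        obtain ⟨hc, h1l, hc1⟩ := h3
        rw [getElem!_pos s (i+1) h1l] at hc1
        rw [hd, List.drop_eq_getElem_cons h1l, hc, hc1, tok_end, procB]
        simp only [String.reduceEq, reduceIte]
        exact ih (s.length - (i+2)) (by omega) s (max 0 (depth-1)) (i+2) rfl
      · -- skip one char
        rw [hd, tok_skip]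
        · exact ih (s.length - (i+1)) (by omega) s depth (i+1) rfl
        · rw [take_one_drop]; push Not at h1 ⊢
          intro hc hl; exact (h1 hc hl)
        · rw [take_one_drop]; push Not at h3 ⊢
          intro hc hl; exact (h3 hc hl)
    · simp only [dif_neg h]
      rw [List.drop_eq_nil_of_le (by omega), tok_nil, procB]

-- ===== VERDICT (by name: the statement is the Claim_ definition above) =====
theorem update_comment_depth_py_spec : Claim_equal_update_comment_depth_py := by
  intro depth line _
  unfold Spec_update_comment_depth_py update_comment_depth_py update_comment_depth_py_alt
  simpa using loopA_eq_proc line.toList.length line.toList depth 0 (by omega)
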